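-- pv_equiv track=rewrite | github.com/Longthor-VACHOUAXIONG/HaoXai | utils/ml_trainer.py | _get_important_columns
-- ===== SOURCE A (Python) =====
-- def _get_important_columns(columns):
--     """Get important columns for generating questions"""
--     important = []
--
--     # Priority columns
--     priority_patterns = ['id', 'name', 'code', 'sample', 'host', 'location', 'date', 'result', 'type', 'status']
--
--     for col in columns:
--         col_lower = col.lower()
--         if any(pattern in col_lower for pattern in priority_patterns):
--             important.append(col)
--
--     # Add more columns if needed
--     if len(important) < 5:
--         for col in columns:
--             if col not in important:
--                 important.append(col)
--                 if len(important) >= 5: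
--                     break
--
--     return important[:5]  # Return top 5
-- ===== SOURCE B (Python) =====
-- def _get_important_columns(columns):
--     """Get important columns for generating questions"""
--     priority_patterns = ('id', 'name', 'code', 'sample', 'host', 'location', 'date', 'result', 'type', 'status')
--     matched = []
--     fill = []
--     seen = set()
--     for col in columns:
--         col_lower = col.lower()
--         if any(p in col_lower for p in priority_patterns):
--             matched.append(col)
--         elif col not in seen:
--             seen.add(col)
--             fill.append(col)
--     return (matched + fill)[:5]
-- ===== Notes on version B (the rewrite author's own statement) =====
-- stated objective: simpler
-- what changed: Replaces A's two sequential phases (collect matches, then re-scan all columns testing membership in the growing result with an early break) by a single pass that splits columns into priority matches and order-deduplicated fill candidates via a seen-set, then truncates the concatenation to 5.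
import Mathlib
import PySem

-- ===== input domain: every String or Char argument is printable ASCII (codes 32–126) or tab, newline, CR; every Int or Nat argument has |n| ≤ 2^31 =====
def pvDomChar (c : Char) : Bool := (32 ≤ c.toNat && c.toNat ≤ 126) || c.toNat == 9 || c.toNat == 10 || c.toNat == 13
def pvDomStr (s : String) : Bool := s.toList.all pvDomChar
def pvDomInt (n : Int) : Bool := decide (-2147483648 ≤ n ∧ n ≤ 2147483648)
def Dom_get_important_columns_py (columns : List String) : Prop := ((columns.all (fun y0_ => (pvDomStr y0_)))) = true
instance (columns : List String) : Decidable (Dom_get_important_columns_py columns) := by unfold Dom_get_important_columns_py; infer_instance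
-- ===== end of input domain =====

-- B restructures A's two sequential phases into a single pass that splits the columns into
-- priority-matching ones and deduplicated fill candidates, then truncates; objective: simpler (one pass, no re-scan of the result list).

-- shared helper: the priority test 'any(pattern in col.lower() for pattern in priority_patterns)',
-- textually identical in both Python sources
def pvPatterns : List String :=
  ["id", "name", "code", "sample", "host", "location", "date", "result", "type", "status"]

def pvM (col : String) : Bool :=
  let col_lower := PySem.Str.lower col
  pvPatterns.any (fun pattern => PySem.Str.isIn pattern col_lower)

-- ===== PORT A =====
-- A's second loop: 'for col in columns: if col not in important: append; break at 5'
def pvFillA : List String → List String → List String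
  | [], important => important
  | col :: rest, important =>
    if col ∈ important then pvFillA rest important
    else
      let important' := important ++ [col]
      if 5 ≤ important'.length then important' else pvFillA rest important'

def get_important_columns_py (columns : List String) : List String :=
  let important := columns.foldl (fun important col =>
    if pvM col then important ++ [col] else important) []
  let important := if important.length < 5 then pvFillA columns important else important
  PySem.List.slice important none (some 5)

-- ===== PORT B =====
-- B's single loop: matched / fill / seen accumulators
def pvLoopB : List String → List String → List String → PySem.Set String → List String × List String
  | [], matched, fill, _ => (matched, fill)
  | col :: rest, matched, fill, seen =>
    if pvM col then pvLoopB rest (matched ++ [col]) fill seen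
    else if PySem.Set.contains seen col then pvLoopB rest matched fill seen
    else pvLoopB rest matched (fill ++ [col]) (PySem.Set.add seen col)

def get_important_columns_py_alt (columns : List String) : List String :=
  let mf := pvLoopB columns [] [] PySem.Set.empty
  PySem.List.slice (mf.1 ++ mf.2) none (some 5)

-- ===== PRECONDITION & SPEC =====
def Spec_get_important_columns_py (columns : List String) (out : List String) : Prop := out = get_important_columns_py_alt columns
instance (columns : List String) (out : List String) : Decidable (Spec_get_important_columns_py columns out) := by unfold Spec_get_important_columns_py; infer_instance

-- ===== CLAIM (what is proved, stated in full; the proofs are below) =====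
def Claim_equal_get_important_columns_py : Prop := ∀ (columns : List String), Dom_get_important_columns_py columns → Spec_get_important_columns_py columns (get_important_columns_py columns)

-- ===== LEMMAS AND PROOFS =====

-- the ordered dedup of the columns against a growing 'already taken' list: what A's fill loop
-- would append if it never broke
def pvDedupNC : List String → List String → List String
  | [], _ => []
  | col :: rest, imp => if col ∈ imp then pvDedupNC rest imp else col :: pvDedupNC rest (imp ++ [col])

lemma pvFillA_take (cols : List String) (imp : List String) (h : imp.length < 5) :
    (pvFillA cols imp).take 5 = (imp ++ pvDedupNC cols imp).take 5 := by
  induction cols generalizing imp with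
  | nil => simp [pvFillA, pvDedupNC]
  | cons c rest ih =>
    simp only [pvFillA, pvDedupNC]
    by_cases hc : c ∈ imp
    · simp [hc, ih imp h]
    · simp only [hc, if_false]
      by_cases h5 : 5 ≤ (imp ++ [c]).length
      · have h4 : imp.length = 4 := by simp at h5; omega
        simp only [h5, if_true]
        rw [List.take_of_length_le (by simp [h4]),
            show imp ++ c :: pvDedupNC rest (imp ++ [c]) = (imp ++ [c]) ++ pvDedupNC rest (imp ++ [c]) by simp,
            List.take_append_of_le_length (by simp [h4]),
            List.take_of_length_le (by simp [h4])]
      · simp only [h5, if_false]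
        rw [ih (imp ++ [c]) (by simp at h5 ⊢; omega)]
        simp

lemma pvLoopB_fst (cols m f : List String) (seen : PySem.Set String) :
    (pvLoopB cols m f seen).1 = m ++ cols.filter pvM := by
  induction cols generalizing m f seen with
  | nil => simp [pvLoopB]
  | cons c rest ih =>
    simp only [pvLoopB, List.filter]
    by_cases hc : pvM c
    · simp [hc, ih]
    · simp only [hc, Bool.false_eq_true, if_false]
      split <;> simp [ih]

lemma pvLoopB_snd (cols : List String) (imp m f : List String) (seen : PySem.Set String)
    (h1 : ∀ c ∈ cols, pvM c = true → c ∈ imp)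
    (h2 : ∀ c, pvM c = false → (c ∈ imp ↔ PySem.Set.contains seen c = true)) :
    (pvLoopB cols m f seen).2 = f ++ pvDedupNC cols imp := by
  induction cols generalizing imp m f seen with
  | nil => simp [pvLoopB, pvDedupNC]
  | cons c rest ih =>
    simp only [pvLoopB, pvDedupNC]
    by_cases hc : pvM c
    · have hmem : c ∈ imp := h1 c (by simp) hc
      simp only [hc, hmem, if_pos]
      exact ih imp _ f seen (fun x hx => h1 x (by simp [hx]) ) h2
    · have hcf : pvM c = false := by simpa using hc
      simp only [hc, if_false, Bool.false_eq_true]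
      by_cases hs : PySem.Set.contains seen c
      · have hmem : c ∈ imp := (h2 c hcf).mpr hs
        simp only [hs, hmem, if_pos]
        exact ih imp m f seen (fun x hx => h1 x (by simp [hx])) h2
      · have hmem : c ∉ imp := fun hin => hs ((h2 c hcf).mp hin)
        simp only [hs, Bool.false_eq_true, hmem, if_neg, not_false_iff]
        rw [ih (imp ++ [c]) m (f ++ [c]) (PySem.Set.add seen c)
          (fun x hx hxm => by simp [h1 x (by simp [hx]) hxm])
          (fun x hxf => by
            rw [List.mem_append, h2 x hxf]
            simp [PySem.Set.mem_add])]
        simp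

lemma pv_slice5 (xs : List String) : PySem.List.slice xs none (some 5) = xs.take 5 := by
  rw [PySem.List.slice_to xs (by norm_num)]
  rfl

-- ===== VERDICT (by name: the statement is the Claim_ definition above) =====
theorem get_important_columns_py_spec : Claim_equal_get_important_columns_py := by
  intro columns _
  unfold Spec_get_important_columns_py get_important_columns_py get_important_columns_py_alt
  simp only [PySem.List.foldl_append_if_eq_filter, List.nil_append]
  rw [pv_slice5, pv_slice5, pvLoopB_fst,
      pvLoopB_snd columns (columns.filter pvM) [] [] PySem.Set.empty
        (fun c hc hm => List.mem_filter.mpr ⟨hc, hm⟩)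
        (fun c hcf => by
          constructor
          · intro hin; exact absurd (List.mem_filter.mp hin).2 (by simp [hcf])
          · intro hin; exact absurd hin (by simp [PySem.Set.empty, PySem.Set.contains]))]
  simp only [List.nil_append]
  by_cases h5 : (columns.filter pvM).length < 5
  · rw [if_pos h5, pvFillA_take columns _ h5]
  · rw [if_neg h5, List.take_append_of_le_length (by omega)]
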